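-- pv_equiv track=rewrite | github.com/omriz/coding_questions | 1030.py | get_minimal_xor
-- ===== SOURCE A (Python) =====
-- def get_next(a,b):
--     if a == 'B':
--         if b == 'G':
--             return 'R'
--         else:
--             return 'G'
--     elif a == 'G':
--         if b == 'R':
--             return 'B'
--         else:
--             return 'R'
--     else: # a == 'R'
--         if b == 'B':
--             return 'G'
--         else:
--             return 'B'
--
-- def get_minimal_xor(row):
--     if len(row) == 0:
--         return []
--     new_row = row[:]
--     while len(set(new_row)) != 1:
--         i = 0
--         while i < len(new_row) -1:
--             if new_row[i] != new_row[i+1]: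
--                 break
--             i += 1
--         if i != len(new_row)-1:
--             new_row = new_row[:i]  + [get_next(new_row[i],new_row[i+1])] + new_row[i+2:]
--     return new_row
-- ===== SOURCE B (Python) =====
-- def get_next(a, b):
--     if a == 'B':
--         if b == 'G':
--             return 'R'
--         else:
--             return 'G'
--     elif a == 'G':
--         if b == 'R':
--             return 'B'
--         else:
--             return 'R'
--     else:
--         if b == 'B':
--             return 'G'
--         else:
--             return 'B'
--
-- def get_minimal_xor(row):
--     # single left-to-right stack pass: the stack is always uniform, so merging
--     # the new element with the top reproduces A's leftmost-pair merges
--     stack = []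
--     for x in row:
--         while stack and stack[-1] != x:
--             x = get_next(stack.pop(), x)
--         stack.append(x)
--     return stack
-- ===== Notes on version B (the rewrite author's own statement) =====
-- stated objective: faster
-- what changed: Replaced A's repeated restart-from-the-left scans over the whole list (find leftmost unequal adjacent pair, splice, rescan) by a single left-to-right stack pass that merges the incoming element with the stack top while they differ, exploiting the invariant that the prefix before the leftmost unequal pair is uniform.
import Mathlib
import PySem

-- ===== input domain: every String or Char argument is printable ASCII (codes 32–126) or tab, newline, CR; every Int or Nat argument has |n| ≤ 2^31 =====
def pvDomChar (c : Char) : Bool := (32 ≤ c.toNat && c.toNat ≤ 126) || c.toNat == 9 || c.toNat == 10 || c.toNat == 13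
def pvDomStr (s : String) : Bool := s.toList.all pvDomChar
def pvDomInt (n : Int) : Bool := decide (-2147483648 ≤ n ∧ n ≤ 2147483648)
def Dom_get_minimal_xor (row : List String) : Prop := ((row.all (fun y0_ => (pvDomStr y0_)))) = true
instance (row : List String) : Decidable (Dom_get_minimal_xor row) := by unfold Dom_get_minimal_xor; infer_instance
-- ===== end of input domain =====

-- B replaces A's repeated restart-from-the-left scan-and-splice passes by a single
-- left-to-right stack pass (merge incoming element with the stack top while unequal);
-- objective: faster (asymptotic, O(n) vs O(n^2)).


-- ===== PORT A =====
-- helper get_next, branch for branch as in the Python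
def get_next (a b : String) : String :=
  if a = "B" then (if b = "G" then "R" else "G")
  else if a = "G" then (if b = "R" then "B" else "R")
  else (if b = "B" then "G" else "B")

-- inner while loop: i = 0; while i < len-1: if row[i] != row[i+1]: break; i += 1
-- (indices are in range by the guard, so getD is exact for Python's row[i])
def pvScanA (l : List String) (i : Nat) : Nat :=
  if _h : i < l.length - 1 then
    if l.getD i "" ≠ l.getD (i + 1) "" then i else pvScanA l (i + 1)
  else i
termination_by l.length - i
decreasing_by omega

-- the scan never passes len-1 (cited by pvLoopA's decreasing_by)
theorem pvScanA_le (l : List String) (i : Nat) (h : i ≤ l.length - 1) :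
    pvScanA l i ≤ l.length - 1 := by
  fun_induction pvScanA l i with
  | case1 j hj hne => omega
  | case2 j hj heq ih => exact ih (by omega)
  | case3 j hj => omega

-- outer while loop; the splice row[:i] + [get_next(row[i],row[i+1])] + row[i+2:] is
-- take/drop (exact for these nonnegative in-range slice bounds, PySem.List.slice_to/slice_from).
-- The `else r` branch is unreachable: i = len-1 with a non-singleton set cannot occur
-- (Python would loop forever only there); it only makes the recursion total.
def pvLoopA (r : List String) : List String :=
  if (PySem.Set.ofList r).length ≠ 1 then
    if _h : pvScanA r 0 ≠ r.length - 1 then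
      pvLoopA (r.take (pvScanA r 0) ++ [get_next (r.getD (pvScanA r 0) "") (r.getD (pvScanA r 0 + 1) "")] ++ r.drop (pvScanA r 0 + 2))
    else r
  else r
termination_by r.length
decreasing_by
  have h0 : pvScanA r 0 ≤ r.length - 1 := pvScanA_le r 0 (by omega)
  simp [List.length_append, List.length_take, List.length_drop]
  omega

def get_minimal_xor (row : List String) : List String :=
  if row.length = 0 then [] else pvLoopA row

-- ===== PORT B =====
-- the inner while of Source B: pop and merge while the stack top differs from x, then push.
-- The stack is kept top-first (head = Python's stack[-1]); get_minimal_xor_alt reverses at the end.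
def pvPush (stack : List String) (x : String) : List String :=
  match stack with
  | [] => [x]
  | t :: rest => if t ≠ x then pvPush rest (get_next t x) else x :: t :: rest

def get_minimal_xor_alt (row : List String) : List String :=
  (row.foldl pvPush []).reverse

-- ===== PRECONDITION & SPEC =====
def Spec_get_minimal_xor (row : List String) (out : List String) : Prop := out = get_minimal_xor_alt row
instance (row : List String) (out : List String) : Decidable (Spec_get_minimal_xor row out) := by unfold Spec_get_minimal_xor; infer_instance

-- ===== CLAIM (what is proved, stated in full; the proofs are below) =====
def Claim_equal_get_minimal_xor : Prop := ∀ (row : List String), Dom_get_minimal_xor row → Spec_get_minimal_xor row (get_minimal_xor row)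

-- ===== LEMMAS AND PROOFS =====

-- pushing onto a uniform stack of the same element just stacks it
theorem pvPush_replicate_same (m : Nat) (a : String) :
    pvPush (List.replicate m a) a = List.replicate (m + 1) a := by
  cases m with
  | zero => rfl
  | succ k => simp [List.replicate_succ, pvPush]

-- B on a uniform block keeps the stack uniform
theorem foldl_pvPush_replicate (k m : Nat) (a : String) :
    (List.replicate k a).foldl pvPush (List.replicate m a) = List.replicate (k + m) a := by
  induction k generalizing m with
  | zero => simp
  | succ n ih =>
    rw [List.replicate_succ, List.foldl_cons, pvPush_replicate_same, ih (m + 1)]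
    congr 1
    omega

-- the merge step: pushing b onto a uniform a-stack (a ≠ b) = pushing get_next a b onto one fewer a
theorem pvPush_replicate_ne (m : Nat) (a b : String) (hab : a ≠ b) :
    pvPush (List.replicate (m + 1) a) b = pvPush (List.replicate m a) (get_next a b) := by
  simp [List.replicate_succ, pvPush, hab]

-- all adjacent positions the scan walked over are equal
theorem pvScanA_chain (l : List String) (i : Nat) :
    ∀ k, i ≤ k → k < pvScanA l i → l.getD k "" = l.getD (k + 1) "" := by
  fun_induction pvScanA l i with
  | case1 j hj hne => intro k h1 h2; omega
  | case2 j hj heq ih =>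
    intro k h1 h2
    rcases Nat.eq_or_lt_of_le h1 with rfl | h
    · simpa using heq
    · exact ih k h h2
  | case3 j hj => intro k h1 h2; omega

-- if the scan stopped before len-1, it stopped at an unequal adjacent pair
theorem pvScanA_break (l : List String) (j : Nat) (h : pvScanA l j < l.length - 1) :
    l.getD (pvScanA l j) "" ≠ l.getD (pvScanA l j + 1) "" := by
  fun_induction pvScanA l j with
  | case1 j hj hne => exact hne
  | case2 j hj heq ih => exact ih h
  | case3 j hj => omega

-- hence the whole prefix 0..i of the scan result is one value
theorem prefix_uniform (l : List String) (i : Nat) (hi : i ≤ pvScanA l 0) :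
    ∀ k, k ≤ i → l.getD k "" = l.getD 0 "" := by
  induction i with
  | zero =>
    intro k hk
    have h0 : k = 0 := Nat.le_zero.mp hk
    rw [h0]
  | succ n ih =>
    intro k hk
    rcases Nat.lt_or_ge k (n + 1) with h | h
    · exact ih (by omega) k (by omega)
    · have hkn : k = n + 1 := by omega
      subst hkn
      rw [← pvScanA_chain l 0 n (by omega) (by omega)]
      exact ih (by omega) n (by omega)

-- a uniform prefix of r is literally a replicate
theorem take_eq_replicate_of_uniform (r : List String) (m : Nat) (a : String)
    (hm : m ≤ r.length) (h : ∀ k, k < m → r.getD k "" = a) :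
    r.take m = List.replicate m a := by
  apply List.ext_getElem
  · simp [hm]
  · intro k h1 h2
    simp only [List.getElem_take, List.getElem_replicate]
    have hk : k < m := by simpa [hm] using h1
    rw [← h k hk, List.getD_eq_getElem r "" (by omega)]

-- the set of a nonempty uniform list is the singleton
theorem ofList_replicate_succ (n : Nat) (a : String) :
    PySem.Set.ofList (List.replicate (n + 1) a) = [a] := by
  have haux : ∀ m, List.foldl PySem.Set.add [a] (List.replicate m a) = [a] := by
    intro m
    induction m with
    | zero => rfl
    | succ p ih =>
      rw [List.replicate_succ, List.foldl_cons]
      have : PySem.Set.add [a] a = [a] := by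
        simp [PySem.Set.add, PySem.Set.contains]
      rw [this, ih]
  rw [PySem.Set.ofList_eq_foldl, List.replicate_succ, List.foldl_cons]
  have h0 : PySem.Set.add ([] : List String) a = [a] := by
    simp [PySem.Set.add, PySem.Set.contains]
  rw [h0, haux]

-- if the set is a singleton, all elements of the list are equal
theorem all_eq_of_ofList_len_one (l : List String) (h : (PySem.Set.ofList l).length = 1) :
    ∀ x ∈ l, ∀ y ∈ l, x = y := by
  obtain ⟨a, ha⟩ : ∃ a, PySem.Set.ofList l = [a] := by
    match hs : PySem.Set.ofList l with
    | [a] => exact ⟨a, rfl⟩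
    | [] => rw [hs] at h; simp at h
    | a :: b :: t => rw [hs] at h; simp at h
  intro x hx y hy
  have hx' : x ∈ PySem.Set.ofList l := (PySem.Set.mem_ofList _ _).2 hx
  have hy' : y ∈ PySem.Set.ofList l := (PySem.Set.mem_ofList _ _).2 hy
  rw [ha] at hx' hy'
  simp at hx' hy'
  rw [hx', hy']

-- B is the identity on a uniform list
theorem alt_uniform (l : List String) (hall : ∀ x ∈ l, ∀ y ∈ l, x = y) :
    get_minimal_xor_alt l = l := by
  cases l with
  | nil => rfl
  | cons a t =>
    have hrep : a :: t = List.replicate (a :: t).length a := by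
      apply List.eq_replicate_of_mem
      intro b hb
      exact hall b hb a (by simp)
    rw [get_minimal_xor_alt]
    conv_lhs => rw [hrep]
    have h2 := foldl_pvPush_replicate (a :: t).length 0 a
    simp only [List.replicate_zero] at h2
    rw [h2, Nat.add_zero, List.reverse_replicate, ← hrep]

-- one leftmost merge of A does not change what B computes
theorem alt_merge_step (r : List String) (hlt : pvScanA r 0 < r.length - 1) :
    get_minimal_xor_alt
      (r.take (pvScanA r 0) ++ [get_next (r.getD (pvScanA r 0) "") (r.getD (pvScanA r 0 + 1) "")]
        ++ r.drop (pvScanA r 0 + 2))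
      = get_minimal_xor_alt r := by
  set i := pvScanA r 0 with hi
  set a := r.getD 0 "" with ha
  set b := r.getD (i + 1) "" with hb
  have hlen : i + 1 < r.length := by omega
  have huni : ∀ k, k ≤ i → r.getD k "" = a := prefix_uniform r i (le_refl _)
  have hia : r.getD i "" = a := huni i (le_refl _)
  have hne : a ≠ b := by
    have := pvScanA_break r 0 hlt
    rw [← hi, hia] at this
    exact this
  have htk1 : r.take (i + 1) = List.replicate (i + 1) a :=
    take_eq_replicate_of_uniform r (i + 1) a (by omega) (fun k hk => huni k (by omega))
  have htk : r.take i = List.replicate i a :=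
    take_eq_replicate_of_uniform r i a (by omega) (fun k hk => huni k (by omega))
  have hdrop : r.drop (i + 1) = b :: r.drop (i + 2) := by
    rw [List.drop_eq_getElem_cons hlen, hb, List.getD_eq_getElem r "" hlen]
  have hr : r = List.replicate (i + 1) a ++ b :: r.drop (i + 2) := by
    conv_lhs => rw [← List.take_append_drop (i + 1) r]
    rw [htk1, hdrop]
  -- evaluate both folds
  have hfold : ∀ (k : Nat), List.foldl pvPush [] (List.replicate k a) = List.replicate k a := by
    intro k
    have := foldl_pvPush_replicate k 0 a
    simpa using this
  unfold get_minimal_xor_alt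
  congr 1
  rw [htk, hia]
  conv_rhs => rw [hr]
  simp only [List.foldl_append, List.foldl_cons, List.foldl_nil, hfold]
  rw [pvPush_replicate_ne i a b hne]

-- main induction: the outer loop of A computes what B computes
theorem pvLoopA_eq_alt (r : List String) : pvLoopA r = get_minimal_xor_alt r := by
  fun_induction pvLoopA r with
  | case1 r hset hne ih =>
    rw [ih]
    apply alt_merge_step
    have hle : pvScanA r 0 ≤ r.length - 1 := pvScanA_le r 0 (by omega)
    omega
  | case2 r hset hstop =>
    -- unreachable branch: the scan reached the end, so r is uniform and the set is a singleton
    cases hr : r with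
    | nil => rfl
    | cons x t =>
      exfalso
      subst hr
      have hstop' : pvScanA (x :: t) 0 = (x :: t).length - 1 := by omega
      have huni : ∀ k, k ≤ (x :: t).length - 1 → (x :: t).getD k "" = (x :: t).getD 0 "" :=
        prefix_uniform (x :: t) _ (by omega)
      have hrep : (x :: t).take (x :: t).length = List.replicate (x :: t).length ((x :: t).getD 0 "") :=
        take_eq_replicate_of_uniform _ _ _ (le_refl _) (fun k hk => huni k (by simp at hk ⊢; omega))
      rw [List.take_length] at hrep
      have hx : (x :: t).getD 0 "" = x := rfl
      rw [hx] at hrep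
      have : PySem.Set.ofList (x :: t) = [x] := by
        rw [hrep]
        have hlen : (x :: t).length = t.length + 1 := by simp
        rw [show (x :: t).length = t.length + 1 from by simp]
        exact ofList_replicate_succ t.length x
      rw [this] at hset
      simp at hset
  | case3 r hset =>
    have h1 : (PySem.Set.ofList r).length = 1 := by omega
    exact (alt_uniform r (all_eq_of_ofList_len_one r h1)).symm

-- ===== VERDICT (by name: the statement is the Claim_ definition above) =====
theorem get_minimal_xor_spec : Claim_equal_get_minimal_xor := by
  intro row _
  unfold Spec_get_minimal_xor get_minimal_xor
  split
  · rename_i h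
    have h0 : row = [] := List.length_eq_zero_iff.1 h
    rw [h0]
    rfl
  · exact pvLoopA_eq_alt row
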